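-- pv_equiv track=rewrite | github.com/nobe0716/problem_solving | atcoder/arc118/arc118_a.py | solve
-- ===== SOURCE A (Python) =====
-- import math
--
-- def solve(t, n):
--     def get_price(a):
--         return int(math.floor((100 + t) * a / 100))
--
--     num_set = set()
--     for i in range(1, 10001):
--         num_set.add(get_price(i))
--
--     candidates = []
--
--     for i in range(1, 10000 + t * 100):
--         if i in num_set:
--             continue
--         candidates.append(i)
--
--     n -= 1
--     res = int(10000 + t * 100) * (n // len(candidates)) + candidates[n % len(candidates)]
--     return res
-- ===== SOURCE B (Python) =====
-- def solve(t, n):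
--     # k-th missing price in one period of length 100+t is ((100+t)*k - 1) // t;
--     # A's candidate block spans 100 periods (length 100*(100+t), 100*t missing values).
--     P = 100 + t
--     q, r = divmod(n - 1, 100 * t)
--     qq, k = divmod(r, t)
--     return 100 * P * q + P * qq + (P * (k + 1) - 1) // t
-- ===== Notes on version B (the rewrite author's own statement) =====
-- stated objective: faster
-- what changed: Replaced the 10000-element reachable-price set and the linear scan over the whole 100*(100+t) period by a closed-form formula for the k-th unreachable price, computed with two divmods.
import Mathlib
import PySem

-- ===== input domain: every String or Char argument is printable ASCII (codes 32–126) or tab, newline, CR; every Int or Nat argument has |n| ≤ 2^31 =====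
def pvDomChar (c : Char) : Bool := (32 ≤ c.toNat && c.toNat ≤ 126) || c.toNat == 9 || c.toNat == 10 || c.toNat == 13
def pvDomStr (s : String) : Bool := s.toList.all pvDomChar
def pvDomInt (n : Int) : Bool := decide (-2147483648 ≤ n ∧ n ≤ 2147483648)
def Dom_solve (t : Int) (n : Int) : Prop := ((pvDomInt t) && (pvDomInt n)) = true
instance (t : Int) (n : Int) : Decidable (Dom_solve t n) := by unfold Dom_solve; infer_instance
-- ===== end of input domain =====

-- B replaces A's reachable-price set and full-period scan by a closed-form formula for the
-- k-th unreachable price (objective: faster; a timing run measures the speedup).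


-- ===== PORT A =====
-- get_price: math.floor((100+t)*a/100) — on the admitted domain (|t| ≤ 2^31, 1 ≤ a ≤ 10000)
-- the float quotient is far from any rounding tie, so the float floor equals exact floor division.
def pvGetPrice (t : Int) (a : Int) : Int := PySem.Int.floordiv ((100 + t) * a) 100

-- Python's num_set is a hash set consumed only via add and membership (its iteration order
-- is never used), so it is modelled exactly by Std.HashSet.
def pvNumSet (t : Int) : Std.HashSet Int :=
  (PySem.List.pyRange 1 10001 1).foldl (fun s i => s.insert (pvGetPrice t i)) ∅

-- candidates.append(i) is O(1) in Python: modelled by Array.push, read out as a List at the end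
def pvCandidates (t : Int) : List Int :=
  let ns := pvNumSet t
  ((PySem.List.pyRange 1 (10000 + t * 100) 1).foldl
    (fun acc i => if ns.contains i then acc else acc.push i) (#[] : Array Int)).toList

def solve (t : Int) (n : Int) : Int :=
  let cs := pvCandidates t
  let n1 := n - 1
  (10000 + t * 100) * (PySem.Int.floordiv n1 (cs.length : Int))
    + PySem.List.pyGetD cs (PySem.Int.mod n1 (cs.length : Int)) 0

-- ===== PORT B =====
def solve_alt (t : Int) (n : Int) : Int :=
  let P := 100 + t
  let q := PySem.Int.floordiv (n - 1) (100 * t)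
  let r := PySem.Int.mod (n - 1) (100 * t)
  let qq := PySem.Int.floordiv r t
  let k := PySem.Int.mod r t
  100 * P * q + P * qq + PySem.Int.floordiv (P * (k + 1) - 1) t

-- ===== PRECONDITION & SPEC =====
-- For t ≤ 0 every value in A's scan range is a reachable price, candidates stays empty and
-- A raises ZeroDivisionError on 'n // len(candidates)'; Pre_ excludes exactly those t.
def Pre_solve (t : Int) (n : Int) : Prop := 1 ≤ t
instance (t : Int) (n : Int) : Decidable (Pre_solve t n) := by unfold Pre_solve; infer_instance
def pvWitness_solve : Int × Int := (3, 7)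

def Spec_solve (t : Int) (n : Int) (out : Int) : Prop := out = solve_alt t n
instance (t : Int) (n : Int) (out : Int) : Decidable (Spec_solve t n out) := by unfold Spec_solve; infer_instance

-- ===== CLAIM (what is proved, stated in full; the proofs are below) =====
def Claim_equal_solve : Prop := ∀ (t : Int) (n : Int), Dom_solve t n → Pre_solve t n → Spec_solve t n (solve t n)

-- ===== LEMMAS AND PROOFS =====

-- the j-th (0-based) unreachable price, j = q*t + k with 0 ≤ k < t
def pvGap (t : Int) (j : Int) : Int :=
  (100 + t) * (j / t) + ((100 + t) * (j % t + 1) - 1) / t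

-- membership in a fold of HashSet.insert
theorem pv_mem_foldl_insert (f : Int → Int) (l : List Int) (s : Std.HashSet Int) (y : Int) :
    y ∈ l.foldl (fun s i => s.insert (f i)) s ↔ y ∈ s ∨ ∃ b ∈ l, y = f b := by
  induction l generalizing s with
  | nil => simp
  | cons a l ih =>
    rw [List.foldl_cons, ih]
    simp only [Std.HashSet.mem_insert, List.mem_cons]
    constructor
    · rintro ((h | h) | ⟨b, hb, rfl⟩)
      · exact Or.inr ⟨a, Or.inl rfl, (beq_iff_eq.1 h).symm⟩
      · exact Or.inl h
      · exact Or.inr ⟨b, Or.inr hb, rfl⟩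
    · rintro (h | ⟨b, hb | hb, rfl⟩)
      · exact Or.inl (Or.inr h)
      · exact Or.inl (Or.inl (by subst hb; exact beq_self_eq_true _))
      · exact Or.inr ⟨b, hb, rfl⟩

-- membership in A's num_set
theorem pv_mem_numset (t : Int) (x : Int) :
    x ∈ pvNumSet t ↔ ∃ a : Int, 1 ≤ a ∧ a < 10001 ∧ pvGetPrice t a = x := by
  unfold pvNumSet
  rw [pv_mem_foldl_insert]
  constructor
  · rintro (h | ⟨a, ha, rfl⟩)
    · exact absurd h Std.HashSet.not_mem_empty
    · exact ⟨a, (PySem.List.mem_pyRange_one.1 ha).1, (PySem.List.mem_pyRange_one.1 ha).2, rfl⟩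
  · rintro ⟨a, h1, h2, rfl⟩
    exact Or.inr ⟨a, PySem.List.mem_pyRange_one.2 ⟨h1, h2⟩, rfl⟩

theorem pv_contains_numset (t x : Int) :
    (pvNumSet t).contains x = true ↔ ∃ a : Int, 1 ≤ a ∧ a < 10001 ∧ pvGetPrice t a = x := by
  rw [← Std.HashSet.mem_iff_contains]
  exact pv_mem_numset t x

-- folding with Array.push is folding with list append
theorem pv_foldl_push (p : Int → Bool) (l : List Int) (ar : Array Int) :
    (l.foldl (fun acc i => if p i then acc else acc.push i) ar).toList
      = l.foldl (fun acc i => if p i then acc else acc ++ [i]) ar.toList := by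
  induction l generalizing ar with
  | nil => rfl
  | cons a l ih =>
    simp only [List.foldl_cons]
    cases h : p a
    · simp only [h, if_neg Bool.false_ne_true, ih, Array.toList_push]
    · simp only [h, ih, if_true, reduceIte]

theorem pv_candidates_eq_filter (t : Int) :
    pvCandidates t = (PySem.List.pyRange 1 (10000 + t * 100) 1).filter
      (fun i => !((pvNumSet t).contains i)) := by
  unfold pvCandidates
  show ((PySem.List.pyRange 1 (10000 + t * 100) 1).foldl
    (fun acc i => if (pvNumSet t).contains i then acc else acc.push i) (#[] : Array Int)).toList = _
  rw [pv_foldl_push (fun i => (pvNumSet t).contains i)]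
  show (PySem.List.pyRange 1 (10000 + t * 100) 1).foldl
    (fun acc i => if (pvNumSet t).contains i then acc else acc ++ [i]) [] = _
  have h : (fun (acc : List Int) (i : Int) =>
      if (pvNumSet t).contains i then acc else acc ++ [i]) =
      (fun (acc : List Int) (i : Int) =>
      if (!((pvNumSet t).contains i)) = true then acc ++ [i] else acc) := by
    funext acc i
    cases hc : (pvNumSet t).contains i <;> rfl
  rw [h, PySem.List.foldl_append_if_eq_filter]
  exact List.nil_append _

-- floor-division split:  pvGap t (q*t+k) = q*(100+t) + (k+1) + (100*k+99)/t   for 0 ≤ k < t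
theorem pv_gap_formula (t q k : Int) (ht : 0 < t) (hk0 : 0 ≤ k) (hkt : k < t) :
    pvGap t (q * t + k) = q * (100 + t) + (k + 1) + (100 * k + 99) / t := by
  unfold pvGap
  have ht' : t ≠ 0 := by omega
  have hdiv : (q * t + k) / t = q := by
    rw [show q * t + k = k + q * t by ring, Int.add_mul_ediv_right _ _ ht',
      Int.ediv_eq_zero_of_lt hk0 hkt]
    ring
  have hmod : (q * t + k) % t = k := by
    rw [show q * t + k = k + t * q by ring, Int.add_mul_emod_self_left,
      Int.emod_eq_of_lt hk0 hkt]
  rw [hdiv, hmod]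
  -- second summand
  have hms := Int.ediv_add_emod (100 * k + 99) t
  set m := (100 * k + 99) / t with hm
  set s := (100 * k + 99) % t with hs
  have hs0 : 0 ≤ s := Int.emod_nonneg _ ht'
  have hst : s < t := Int.emod_lt_of_pos _ ht
  have h2 : (100 + t) * (k + 1) - 1 = s + (k + 1 + m) * t := by linarith [hms]
  rw [h2, Int.add_mul_ediv_right _ _ ht', Int.ediv_eq_zero_of_lt hs0 hst]
  ring

-- bounds for m = (100*k+99)/t when 0 ≤ k < t
theorem pv_m_bounds (t k : Int) (ht : 0 < t) (hk0 : 0 ≤ k) (hkt : k < t) :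
    0 ≤ (100 * k + 99) / t ∧ (100 * k + 99) / t ≤ 99 := by
  have ht' : t ≠ 0 := by omega
  have hms := Int.ediv_add_emod (100 * k + 99) t
  set m := (100 * k + 99) / t
  set s := (100 * k + 99) % t
  have hs0 : 0 ≤ s := Int.emod_nonneg _ ht'
  have hst : s < t := Int.emod_lt_of_pos _ ht
  constructor
  · exact Int.ediv_nonneg (by omega) (by omega)
  · by_contra h
    push_neg at h
    have : 100 * t ≤ t * m := by nlinarith
    nlinarith

-- 100 * pvGap leaves remainder s+1 ∈ [1,t] mod 100+t
theorem pv_gap_mod (t q k : Int) (ht : 0 < t) (hk0 : 0 ≤ k) (hkt : k < t) :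
    1 ≤ 100 * pvGap t (q * t + k) % (100 + t) ∧
      100 * pvGap t (q * t + k) % (100 + t) ≤ t := by
  have ht' : t ≠ 0 := by omega
  have hms := Int.ediv_add_emod (100 * k + 99) t
  set m := (100 * k + 99) / t with hm
  set s := (100 * k + 99) % t with hs
  have hs0 : 0 ≤ s := Int.emod_nonneg _ ht'
  have hst : s < t := Int.emod_lt_of_pos _ ht
  have hv : 100 * pvGap t (q * t + k) = (s + 1) + (100 + t) * (100 * q + m) := by
    rw [pv_gap_formula t q k ht hk0 hkt]
    linarith [hms]
  rw [hv, Int.add_mul_emod_self_left, Int.emod_eq_of_lt (by omega) (by omega)]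
  omega

-- a reachable price has remainder 0 or ≥ t+1 mod 100+t
theorem pv_reach_mod (t a i : Int) (ht : 0 < t) (_ha : 1 ≤ a)
    (hi : pvGetPrice t a = i) :
    100 * i % (100 + t) = 0 ∨ t + 1 ≤ 100 * i % (100 + t) := by
  have hP : (0:Int) < 100 + t := by omega
  have hP' : (100 + t : Int) ≠ 0 := by omega
  unfold pvGetPrice at hi
  rw [PySem.Int.floordiv_eq_ediv_of_pos (by omega : (0:Int) < 100)] at hi
  set X := (100 + t) * a with hX
  have hX1 : 100 * i ≤ X := by omega
  have hX2 : X ≤ 100 * i + 99 := by omega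
  have hu := Int.ediv_add_emod (100 * i) (100 + t)
  set u := 100 * i / (100 + t) with hudef
  set v := 100 * i % (100 + t) with hvdef
  have hv0 : 0 ≤ v := Int.emod_nonneg _ hP'
  have hvP : v < 100 + t := Int.emod_lt_of_pos _ hP
  by_contra hcon
  push_neg at hcon
  have hv1 : 1 ≤ v := by omega
  have hvt : v ≤ t := by omega
  -- (100+t)*(a-u) = v + d with d := X - 100*i ∈ [0,99]
  have hc : (100 + t) * (a - u) = v + (X - 100 * i) := by
    have : X = (100 + t) * a := hX
    nlinarith [hu]
  by_cases hle : a - u ≤ 0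
  · nlinarith
  · have h1 : 1 ≤ a - u := by omega
    nlinarith

-- an in-range value with remainder in [1,t] is NOT reachable, and is a pvGap value
theorem pv_missing_to_gap (t i : Int) (ht : 0 < t) (h1 : 1 ≤ i)
    (h2 : i < 10000 + t * 100)
    (hm1 : 1 ≤ 100 * i % (100 + t)) (hm2 : 100 * i % (100 + t) ≤ t) :
    ∃ j : Int, 0 ≤ j ∧ j < 100 * t ∧ pvGap t j = i := by
  have hP : (0:Int) < 100 + t := by omega
  have hP' : (100 + t : Int) ≠ 0 := by omega
  have ht' : t ≠ 0 := by omega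
  have hu := Int.ediv_add_emod (100 * i) (100 + t)
  set u := 100 * i / (100 + t) with hudef
  set v := 100 * i % (100 + t) with hvdef
  have hu0 : 0 ≤ u := Int.ediv_nonneg (by omega) (by omega)
  have hu9999 : u ≤ 9999 := by
    by_contra h
    push_neg at h
    have : 10000 ≤ u := by omega
    nlinarith
  -- split u by 100 (literal divisor: omega handles it)
  set qq := u / 100 with hqq
  set w := u % 100 with hw
  have hu100 : u = 100 * qq + w ∧ 0 ≤ w ∧ w ≤ 99 ∧ 0 ≤ qq ∧ qq ≤ 99 := by
    constructor
    · omega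
    · constructor
      · omega
      · constructor
        · omega
        · omega
  obtain ⟨huqw, hw0, hw99, hqq0, hqq99⟩ := hu100
  set k := i - qq * (100 + t) - w - 1 with hk
  have hk100 : 100 * (k + 1) = w * t + v := by
    have : 100 * i = (100 + t) * (100 * qq + w) + v := by rw [← huqw]; linarith [hu]
    nlinarith
  have hwt0 : 0 ≤ w * t := mul_nonneg hw0 (by omega)
  have hwt99 : w * t ≤ 99 * t := mul_le_mul_of_nonneg_right hw99 (by omega)
  have hk0 : 0 ≤ k := by nlinarith
  have hkt : k < t := by nlinarith
  refine ⟨qq * t + k, ?_, ?_, ?_⟩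
  · nlinarith
  · nlinarith
  · rw [pv_gap_formula t qq k ht hk0 hkt]
    have hdm : (100 * k + 99) / t = w := by
      have h99 : 100 * k + 99 = (v - 1) + w * t := by omega
      rw [h99, Int.add_mul_ediv_right _ _ ht', Int.ediv_eq_zero_of_lt (by omega) (by omega)]
      ring
    rw [hdm]
    omega

-- an in-range value with remainder NOT in [1,t] IS reachable
theorem pv_mod_to_reach (t i : Int) (ht : 0 < t) (h1 : 1 ≤ i)
    (h2 : i < 10000 + t * 100)
    (hm : ¬(1 ≤ 100 * i % (100 + t) ∧ 100 * i % (100 + t) ≤ t)) :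
    ∃ a : Int, 1 ≤ a ∧ a < 10001 ∧ pvGetPrice t a = i := by
  have hP : (0:Int) < 100 + t := by omega
  have hP' : (100 + t : Int) ≠ 0 := by omega
  have hu := Int.ediv_add_emod (100 * i) (100 + t)
  set u := 100 * i / (100 + t) with hudef
  set v := 100 * i % (100 + t) with hvdef
  have hv0 : 0 ≤ v := Int.emod_nonneg _ hP'
  have hvP : v < 100 + t := Int.emod_lt_of_pos _ hP
  have hu0 : 0 ≤ u := Int.ediv_nonneg (by omega) (by omega)
  have hu9999 : u ≤ 9999 := by
    by_contra h
    push_neg at h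
    have : 10000 ≤ u := by omega
    nlinarith
  push_neg at hm
  have hprice : ∀ b : Int, 100 * i ≤ (100 + t) * b → (100 + t) * b ≤ 100 * i + 99 →
      pvGetPrice t b = i := by
    intro b hb1 hb2
    unfold pvGetPrice
    rw [PySem.Int.floordiv_eq_ediv_of_pos (by omega : (0:Int) < 100)]
    omega
  by_cases hv : v ≤ 0
  · -- v = 0: take a = u
    have hveq : v = 0 := by omega
    refine ⟨u, ?_, by omega, hprice u (by omega) (by omega)⟩
    -- u ≥ 1 since (100+t)*u = 100*i ≥ 100
    by_contra h
    push_neg at h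
    have hu00 : u = 0 := by omega
    rw [hu00] at hu
    omega
  · -- v ≥ t+1: take a = u + 1
    have hvt : t + 1 ≤ v := hm (by omega)
    refine ⟨u + 1, by omega, by omega, hprice (u + 1) (by nlinarith) (by nlinarith)⟩

-- pvGap values are in scan range
theorem pv_gap_range (t j : Int) (ht : 0 < t) (h0 : 0 ≤ j) (hj : j < 100 * t) :
    1 ≤ pvGap t j ∧ pvGap t j < 10000 + t * 100 := by
  have ht' : t ≠ 0 := by omega
  have hjd := Int.ediv_add_emod j t
  set q := j / t with hq
  set k := j % t with hkd
  have hk0 : 0 ≤ k := Int.emod_nonneg _ ht'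
  have hkt : k < t := Int.emod_lt_of_pos _ ht
  have hq0 : 0 ≤ q := Int.ediv_nonneg h0 (by omega)
  have hq99 : q ≤ 99 := by
    by_contra h
    push_neg at h
    have : 100 ≤ q := by omega
    nlinarith
  have hje : j = q * t + k := by linarith [hjd]
  rw [hje, pv_gap_formula t q k ht hk0 hkt]
  obtain ⟨hm0, hm99⟩ := pv_m_bounds t k ht hk0 hkt
  constructor
  · nlinarith
  · nlinarith

-- pvGap is strictly monotone on [0, 100*t)
theorem pv_gap_mono (t j j' : Int) (ht : 0 < t) (_h0 : 0 ≤ j) (hjj : j < j')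
    (_hj' : j' < 100 * t) : pvGap t j < pvGap t j' := by
  have ht' : t ≠ 0 := by omega
  have hjd := Int.ediv_add_emod j t
  have hjd' := Int.ediv_add_emod j' t
  set q := j / t with hq
  set k := j % t with hkd
  set q' := j' / t with hq'
  set k' := j' % t with hkd'
  have hk0 : 0 ≤ k := Int.emod_nonneg _ ht'
  have hkt : k < t := Int.emod_lt_of_pos _ ht
  have hk0' : 0 ≤ k' := Int.emod_nonneg _ ht'
  have hkt' : k' < t := Int.emod_lt_of_pos _ ht
  have hje : j = q * t + k := by linarith [hjd]
  have hje' : j' = q' * t + k' := by linarith [hjd']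
  have hqle : q ≤ q' := Int.ediv_le_ediv ht (by omega)
  rw [hje, pv_gap_formula t q k ht hk0 hkt, hje', pv_gap_formula t q' k' ht hk0' hkt']
  obtain ⟨hm0, hm99⟩ := pv_m_bounds t k ht hk0 hkt
  obtain ⟨hm0', hm99'⟩ := pv_m_bounds t k' ht hk0' hkt'
  rcases eq_or_lt_of_le hqle with hqe | hqlt
  · -- same block: k < k', so m ≤ m'
    have hqt : q * t = q' * t := by rw [hqe]
    have hkk : k < k' := by linarith [hje, hje', hjj, hqt]
    have hmm : (100 * k + 99) / t ≤ (100 * k' + 99) / t :=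
      Int.ediv_le_ediv ht (by omega)
    have hqP : q * (100 + t) = q' * (100 + t) := by rw [hqe]
    linarith
  · -- q < q': pvGap j ≤ q*(100+t) + (100+t) - 1 < (q+1)*(100+t) ≤ q'*(100+t) < pvGap j'
    have h1 : (q + 1) * (100 + t) ≤ q' * (100 + t) :=
      mul_le_mul_of_nonneg_right (by omega) (by omega)
    nlinarith

-- the candidates list is exactly the pvGap values in order
theorem pv_candidates_eq (t : Int) (ht : 0 < t) :
    pvCandidates t = (PySem.List.pyRange 0 (100 * t) 1).map (pvGap t) := by
  rw [pv_candidates_eq_filter]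
  have hnd1 : ((PySem.List.pyRange 1 (10000 + t * 100) 1).filter
      (fun i => !((pvNumSet t).contains i))).Pairwise (· < ·) :=
    (PySem.List.pairwise_lt_pyRange_one 1 (10000 + t * 100)).filter _
  have hnd2 : ((PySem.List.pyRange 0 (100 * t) 1).map (pvGap t)).Pairwise (· < ·) := by
    rw [List.pairwise_map]
    apply List.Pairwise.imp_of_mem (R := (· < ·))
    · intro a b ha hb hab
      exact pv_gap_mono t a b ht (PySem.List.mem_pyRange_one.1 ha).1 hab
        (PySem.List.mem_pyRange_one.1 hb).2
    · exact PySem.List.pairwise_lt_pyRange_one 0 (100 * t)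
  have hmem : ∀ x : Int, x ∈ (PySem.List.pyRange 1 (10000 + t * 100) 1).filter
      (fun i => !((pvNumSet t).contains i)) ↔
      x ∈ (PySem.List.pyRange 0 (100 * t) 1).map (pvGap t) := by
    intro x
    rw [List.mem_filter, PySem.List.mem_pyRange_one, List.mem_map]
    constructor
    · rintro ⟨⟨hx1, hx2⟩, hnc⟩
      have hcf : (pvNumSet t).contains x = false := by
        cases h : (pvNumSet t).contains x
        · rfl
        · rw [h] at hnc
          exact absurd hnc (by decide)
      have hmod : 1 ≤ 100 * x % (100 + t) ∧ 100 * x % (100 + t) ≤ t := by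
        by_contra hcon
        obtain ⟨a, ha1, ha2, ha3⟩ := pv_mod_to_reach t x ht hx1 hx2 hcon
        rw [(pv_contains_numset t x).2 ⟨a, ha1, ha2, ha3⟩] at hcf
        cases hcf
      obtain ⟨j, hj0, hjt, hje⟩ := pv_missing_to_gap t x ht hx1 hx2 hmod.1 hmod.2
      exact ⟨j, PySem.List.mem_pyRange_one.2 ⟨hj0, hjt⟩, hje⟩
    · rintro ⟨j, hj, rfl⟩
      obtain ⟨hj0, hjt⟩ := PySem.List.mem_pyRange_one.1 hj
      obtain ⟨hr1, hr2⟩ := pv_gap_range t j ht hj0 hjt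
      refine ⟨⟨hr1, hr2⟩, ?_⟩
      have hkk := Int.ediv_add_emod j t
      have hk0 : 0 ≤ j % t := Int.emod_nonneg _ (by omega)
      have hkt : j % t < t := Int.emod_lt_of_pos _ ht
      have hje : j = (j / t) * t + j % t := by linarith [hkk]
      have hmod := pv_gap_mod t (j / t) (j % t) ht hk0 hkt
      rw [← hje] at hmod
      cases hcb : (pvNumSet t).contains (pvGap t j) with
      | false => rfl
      | true =>
        obtain ⟨a, ha1, _, ha3⟩ := (pv_contains_numset t _).1 hcb
        rcases pv_reach_mod t a (pvGap t j) ht ha1 ha3 with h | h <;> omega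
  have hperm : ((PySem.List.pyRange 1 (10000 + t * 100) 1).filter
      (fun i => !((pvNumSet t).contains i))).Perm
      ((PySem.List.pyRange 0 (100 * t) 1).map (pvGap t)) := by
    rw [List.perm_ext_iff_of_nodup (hnd1.imp ne_of_lt) (hnd2.imp ne_of_lt)]
    exact hmem
  exact hperm.eq_of_pairwise (le := (· < ·))
    (fun a b _ _ h1 h2 => absurd h2 (lt_asymm h1)) hnd1 hnd2

-- ===== VERDICT (by name: the statement is the Claim_ definition above) =====
theorem solve_spec : Claim_equal_solve := by
  intro t n _ hpre
  unfold Pre_solve at hpre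
  unfold Spec_solve
  simp only [solve, solve_alt]
  have ht : (0:Int) < t := by omega
  have hL : (0:Int) < 100 * t := by omega
  rw [pv_candidates_eq t ht]
  have hlen : (((PySem.List.pyRange 0 (100 * t) 1).map (pvGap t)).length : Int) = 100 * t := by
    rw [List.length_map, PySem.List.length_pyRange_one]
    omega
  rw [hlen]
  simp only [PySem.Int.floordiv_eq_ediv_of_pos hL, PySem.Int.mod_eq_emod_of_pos hL]
  set r := (n - 1) % (100 * t) with hr
  have hr0 : 0 ≤ r := Int.emod_nonneg _ (by omega)
  have hrL : r < 100 * t := Int.emod_lt_of_pos _ hL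
  rw [PySem.List.pyGetD_map_pyRange_of_nonneg (pvGap t) (100 * t) r 0 hr0 hrL]
  simp only [PySem.Int.floordiv_eq_ediv_of_pos ht, PySem.Int.mod_eq_emod_of_pos ht]
  unfold pvGap
  ring
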